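-- pv_equiv track=rewrite | github.com/luigi1256/stronpy | Notification_kind.py | four_tags
-- ===== SOURCE A (Python) =====
-- def tags_string(x,obj):
--     f=x['tags']
--     z=[]
--     for j in f:
--       if j[0]==obj:
--           z.append(j[1])
--     return z
--
-- def tags_str(x,obj):
--     f=x['tags']
--     z=[]
--     for j in f:
--       if j[0]==obj:
--           z.append(j)
--     return z
--
-- def four_tags(x,obj):
--    tags_list=[]
--
--    if tags_string(x,obj)!=[]:
--       for jtags in tags_str(x,obj):
--         if len(jtags)>2:
--           for xtags in jtags[2:]:
--            if jtags not in tags_list: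
--              tags_list.append(jtags)
--       return tags_list
-- ===== SOURCE B (Python) =====
-- def four_tags(x, obj):
--     found = False
--     out = []
--     for j in x['tags']:
--         if j[0] == obj:
--             found = True
--             if len(j) > 2 and j not in out:
--                 out.append(j)
--     return out if found else None
-- ===== Notes on version B (the rewrite author's own statement) =====
-- stated objective: simpler
-- what changed: Replaces A's guard scan (tags_string), second matching scan (tags_str) and dead inner loop over jtags[2:] with one single pass over x['tags'] carrying a found-flag and the order-preserving dedup output list.
import Mathlib
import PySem

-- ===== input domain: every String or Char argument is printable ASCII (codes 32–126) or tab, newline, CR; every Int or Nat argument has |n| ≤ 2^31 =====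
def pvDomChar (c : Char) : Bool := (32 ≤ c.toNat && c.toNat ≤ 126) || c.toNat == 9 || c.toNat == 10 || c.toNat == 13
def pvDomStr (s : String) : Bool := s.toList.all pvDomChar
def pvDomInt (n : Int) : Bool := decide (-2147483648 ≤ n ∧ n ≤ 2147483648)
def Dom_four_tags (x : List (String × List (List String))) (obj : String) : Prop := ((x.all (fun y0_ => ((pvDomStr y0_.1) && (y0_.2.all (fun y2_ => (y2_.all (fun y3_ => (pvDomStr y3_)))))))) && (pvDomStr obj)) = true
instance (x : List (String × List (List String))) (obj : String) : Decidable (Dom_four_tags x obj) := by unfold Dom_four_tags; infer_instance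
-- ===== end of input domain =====

-- B replaces A's two helper scans plus guard (and the dead inner loop over jtags[2:]) by one
-- single pass over x['tags'] carrying a found-flag and the dedup output list (objective: simpler).

-- ===== PORT A =====
-- tags_string: collects j[1] of each matching tag; Option threads IndexError/KeyError (none = raise)
def tagsStringA (f : List (List String)) (obj : String) : Option (List String) :=
  f.foldl (fun acc j => acc.bind (fun z =>
    (PySem.List.pyGet? j 0).bind (fun j0 =>
      if j0 == obj then (PySem.List.pyGet? j 1).map (fun j1 => z ++ [j1]) else some z)))
    (some [])

-- tags_str: collects each matching tag itself
def tagsStrA (f : List (List String)) (obj : String) : Option (List (List String)) :=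
  f.foldl (fun acc j => acc.bind (fun z =>
    (PySem.List.pyGet? j 0).map (fun j0 => if j0 == obj then z ++ [j] else z)))
    (some [])

def four_tags (x : List (String × List (List String))) (obj : String) : Option (List (List String)) :=
  match (PySem.Dict.mk x).get? "tags" with
  | none => none          -- KeyError (excluded by Pre_)
  | some f =>
    match tagsStringA f obj with
    | none => none        -- IndexError inside tags_string (excluded by Pre_)
    | some zs =>
      if zs ≠ [] then
        match tagsStrA f obj with
        | none => none    -- IndexError inside tags_str (excluded by Pre_)
        | some ms =>
          some (ms.foldl (fun tl jtags =>
            if 2 < jtags.length then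
              (PySem.List.slice jtags (some 2) none).foldl
                (fun tl _ => if jtags ∈ tl then tl else tl ++ [jtags]) tl
            else tl) [])
      else none           -- Python falls off the function: returns None

-- ===== PORT B =====
def four_tags_alt (x : List (String × List (List String))) (obj : String) : Option (List (List String)) :=
  match (PySem.Dict.mk x).get? "tags" with
  | none => none          -- KeyError
  | some ts =>
    let st := ts.foldl (fun (s : Bool × List (List String)) j =>
      match PySem.List.pyGet? j 0 with
      | none => s         -- IndexError on j[0] (excluded by Pre_; totality guard only)
      | some j0 =>
        if j0 == obj then
          (true, if 2 < j.length ∧ j ∉ s.2 then s.2 ++ [j] else s.2)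
        else s) (false, [])
    if st.1 then some st.2 else none

-- ===== PRECONDITION & SPEC =====
-- Pre_ excludes exactly the inputs where A raises: a missing 'tags' key (KeyError), an empty
-- tag entry (IndexError on j[0]), or a tag matching obj of length 1 (IndexError on j[1]).
def Pre_four_tags (x : List (String × List (List String))) (obj : String) : Prop :=
  ((PySem.Dict.mk x).get? "tags").isSome = true ∧
  ∀ j ∈ ((PySem.Dict.mk x).get? "tags").getD [],
    j ≠ [] ∧ (j.head? = some obj → 2 ≤ j.length)
instance (x : List (String × List (List String))) (obj : String) : Decidable (Pre_four_tags x obj) := by unfold Pre_four_tags; infer_instance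

def pvWitness_four_tags : (List (String × List (List String))) × String :=
  ([("tags", [["a", "u", "p"], ["b", "v"], ["a", "u", "p"]])], "a")

def Spec_four_tags (x : List (String × List (List String))) (obj : String) (out : Option (List (List String))) : Prop := out = four_tags_alt x obj
instance (x : List (String × List (List String))) (obj : String) (out : Option (List (List String))) : Decidable (Spec_four_tags x obj out) := by unfold Spec_four_tags; infer_instance

-- ===== CLAIM (what is proved, stated in full; the proofs are below) =====
def Claim_equal_four_tags : Prop := ∀ (x : List (String × List (List String))) (obj : String), Dom_four_tags x obj → Pre_four_tags x obj → Spec_four_tags x obj (four_tags x obj)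

-- ===== LEMMAS AND PROOFS =====

-- the matching tags, and the dedup-append step shared by the rewritten loops
def pvPred (obj : String) (j : List String) : Bool := j.head? == some obj
def pvStep (tl : List (List String)) (j : List String) : List (List String) :=
  if 2 < j.length ∧ j ∉ tl then tl ++ [j] else tl

theorem pvMemIdem (l : List String) (j : List String) (tl : List (List String)) (h : j ∈ tl) :
    l.foldl (fun tl _ => if j ∈ tl then tl else tl ++ [j]) tl = tl := by
  induction l with
  | nil => rfl
  | cons a l ih => simpa [h] using ih

theorem pvInner (j : List String) (tl : List (List String)) (h : 2 < j.length) :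
    (PySem.List.slice j (some 2) none).foldl
      (fun tl _ => if j ∈ tl then tl else tl ++ [j]) tl =
    if j ∈ tl then tl else tl ++ [j] := by
  rw [PySem.List.slice_from j (by norm_num)]
  have hd : (2 : Int).toNat = 2 := rfl
  rw [hd]
  obtain ⟨a, l, hal⟩ : ∃ a l, j.drop 2 = a :: l := by
    cases hj : j.drop 2 with
    | nil => exfalso; have := List.drop_eq_nil_iff.mp hj; omega
    | cons a l => exact ⟨a, l, rfl⟩
  rw [hal]
  simp only [List.foldl_cons]
  by_cases hm : j ∈ tl
  · simp only [if_pos hm]; exact pvMemIdem l j tl hm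
  · simp only [if_neg hm]; exact pvMemIdem l j _ (by simp)

theorem pvTagsStr (obj : String) (ts : List (List String))
    (H : ∀ j ∈ ts, j ≠ []) :
    ∀ z, ts.foldl (fun acc j => acc.bind (fun z =>
      (PySem.List.pyGet? j 0).map (fun j0 => if j0 == obj then z ++ [j] else z)))
      (some z) = some (z ++ ts.filter (pvPred obj)) := by
  induction ts with
  | nil => intro z; simp
  | cons a ts ih =>
    intro z
    obtain ⟨c, cs, rfl⟩ : ∃ c cs, a = c :: cs := by
      cases a with
      | nil => exact absurd rfl (H [] (by simp))
      | cons c cs => exact ⟨c, cs, rfl⟩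
    simp only [List.foldl_cons, Option.bind_some, PySem.List.pyGet?_zero_cons, Option.map_some,
      List.filter_cons, pvPred]
    by_cases hc : c = obj
    · subst hc
      simp only [beq_self_eq_true, if_pos, List.head?_cons]
      rw [ih (fun j hj => H j (by simp [hj]))]
      simp
    · have hb : (c == obj) = false := by simp [hc]
      simp only [hb, List.head?_cons]
      have hb2 : ((some c == some obj) : Bool) = false := by simp [hc]
      simp only [hb2]
      exact ih (fun j hj => H j (by simp [hj])) z

theorem pvTagsString (obj : String) (ts : List (List String))
    (H : ∀ j ∈ ts, j ≠ [] ∧ (j.head? = some obj → 2 ≤ j.length)) :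
    ∀ z, ts.foldl (fun acc j => acc.bind (fun z =>
      (PySem.List.pyGet? j 0).bind (fun j0 =>
        if j0 == obj then (PySem.List.pyGet? j 1).map (fun j1 => z ++ [j1]) else some z)))
      (some z) =
      some (z ++ (ts.filter (pvPred obj)).map (fun j => (PySem.List.pyGet? j 1).getD "")) := by
  induction ts with
  | nil => intro z; simp
  | cons a ts ih =>
    intro z
    obtain ⟨c, cs, rfl⟩ : ∃ c cs, a = c :: cs := by
      cases a with
      | nil => exact absurd rfl (H [] (by simp)).1
      | cons c cs => exact ⟨c, cs, rfl⟩
    simp only [List.foldl_cons, Option.bind_some, PySem.List.pyGet?_zero_cons,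
      List.filter_cons, pvPred]
    by_cases hc : c = obj
    · subst hc
      have hlen : 2 ≤ (c :: cs).length := (H _ (by simp)).2 (by simp)
      obtain ⟨d, ds, rfl⟩ : ∃ d ds, cs = d :: ds := by
        cases cs with
        | nil => simp at hlen
        | cons d ds => exact ⟨d, ds, rfl⟩
      simp only [beq_self_eq_true, if_pos, List.head?_cons]
      have h1 : PySem.List.pyGet? (c :: d :: ds) 1 = some d := by
        simp [PySem.List.pyGet?, PySem.List.pyIdx?]
      rw [h1]
      simp only [Option.map_some]
      rw [ih (fun j hj => H j (by simp [hj]))]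
      simp
    · have hb : (c == obj) = false := by simp [hc]
      simp only [hb, List.head?_cons]
      have hb2 : ((some c == some obj) : Bool) = false := by simp [hc]
      simp only [hb2]
      exact ih (fun j hj => H j (by simp [hj])) z

theorem pvBfold (obj : String) (ts : List (List String))
    (H : ∀ j ∈ ts, j ≠ []) :
    ∀ (flag : Bool) (tl : List (List String)),
      ts.foldl (fun (s : Bool × List (List String)) j =>
        match PySem.List.pyGet? j 0 with
        | none => s
        | some j0 =>
          if j0 == obj then
            (true, if 2 < j.length ∧ j ∉ s.2 then s.2 ++ [j] else s.2)
          else s) (flag, tl) =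
      (flag || !(ts.filter (pvPred obj)).isEmpty, (ts.filter (pvPred obj)).foldl pvStep tl) := by
  induction ts with
  | nil => intro flag tl; simp
  | cons a ts ih =>
    intro flag tl
    obtain ⟨c, cs, rfl⟩ : ∃ c cs, a = c :: cs := by
      cases a with
      | nil => exact absurd rfl (H [] (by simp))
      | cons c cs => exact ⟨c, cs, rfl⟩
    simp only [List.foldl_cons, PySem.List.pyGet?_zero_cons, List.filter_cons, pvPred]
    by_cases hc : c = obj
    · subst hc
      simp only [beq_self_eq_true, if_pos, List.head?_cons]
      rw [ih (fun j hj => H j (by simp [hj]))]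
      simp [pvStep]
    · have hb : (c == obj) = false := by simp [hc]
      simp only [hb, List.head?_cons]
      have hb2 : ((some c == some obj) : Bool) = false := by simp [hc]
      simp only [hb2]
      exact ih (fun j hj => H j (by simp [hj])) flag tl

theorem pvAouter (ms : List (List String)) :
    ∀ tl, ms.foldl (fun tl jtags =>
      if 2 < jtags.length then
        (PySem.List.slice jtags (some 2) none).foldl
          (fun tl _ => if jtags ∈ tl then tl else tl ++ [jtags]) tl
      else tl) tl = ms.foldl pvStep tl := by
  induction ms with
  | nil => intro tl; rfl
  | cons j ms ih =>
    intro tl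
    simp only [List.foldl_cons]
    have hstep : (if 2 < j.length then
        (PySem.List.slice j (some 2) none).foldl
          (fun tl _ => if j ∈ tl then tl else tl ++ [j]) tl
      else tl) = pvStep tl j := by
      by_cases hl : 2 < j.length
      · rw [if_pos hl, pvInner j tl hl]
        by_cases hm : j ∈ tl
        · simp [pvStep, hm]
        · simp [pvStep, hm, hl]
      · rw [if_neg hl]
        simp [pvStep, hl]
    rw [hstep]
    exact ih _

-- ===== VERDICT (by name: the statement is the Claim_ definition above) =====
theorem four_tags_spec : Claim_equal_four_tags := by
  intro x obj _ hpre
  unfold Spec_four_tags four_tags four_tags_alt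
  obtain ⟨hsome, H⟩ := hpre
  cases hts : (PySem.Dict.mk x).get? "tags" with
  | none => rw [hts] at hsome
  | some ts =>
    rw [hts] at H
    simp only [Option.getD_some] at H
    simp only []
    unfold tagsStringA tagsStrA
    rw [pvTagsString obj ts H [], pvTagsStr obj ts (fun j hj => (H j hj).1) [],
        pvBfold obj ts (fun j hj => (H j hj).1) false []]
    simp only [List.nil_append, Bool.false_or]
    by_cases hemp : ts.filter (pvPred obj) = []
    · simp [hemp]
    · have hmap : (ts.filter (pvPred obj)).map (fun j => (PySem.List.pyGet? j 1).getD "") ≠ [] := by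
        simpa using hemp
      rw [if_pos hmap]
      have hne : (ts.filter (pvPred obj)).isEmpty = false := by
        simpa [List.isEmpty_iff] using hemp
      rw [hne]
      simp only [Bool.not_false, if_pos]
      rw [pvAouter]
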